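-- pv_equiv track=rewrite | github.com/Corrie09/ComputingForDataScienceHW2 | hw2_second_questions.py | job_counts
-- ===== SOURCE A (Python) =====
-- def job_counts(cvs):
--     d = {}
--     for cv in cvs:
--         for job in cv["jobs"]:
--             try:
--                 d[job] += 1
--             except KeyError:
--                 d[job] = 1
--     return d
-- ===== SOURCE B (Python) =====
-- def job_counts(cvs):
--     jobs = [job for cv in cvs for job in cv["jobs"]]
--     return {job: jobs.count(job) for job in jobs}
-- ===== Notes on version B (the rewrite author's own statement) =====
-- stated objective: simpler
-- what changed: Replaces the incremental try/except counter dict with a two-step decomposition: flatten all jobs into one list, then build the result with a dict comprehension whose value is jobs.count(job).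
import Mathlib
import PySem

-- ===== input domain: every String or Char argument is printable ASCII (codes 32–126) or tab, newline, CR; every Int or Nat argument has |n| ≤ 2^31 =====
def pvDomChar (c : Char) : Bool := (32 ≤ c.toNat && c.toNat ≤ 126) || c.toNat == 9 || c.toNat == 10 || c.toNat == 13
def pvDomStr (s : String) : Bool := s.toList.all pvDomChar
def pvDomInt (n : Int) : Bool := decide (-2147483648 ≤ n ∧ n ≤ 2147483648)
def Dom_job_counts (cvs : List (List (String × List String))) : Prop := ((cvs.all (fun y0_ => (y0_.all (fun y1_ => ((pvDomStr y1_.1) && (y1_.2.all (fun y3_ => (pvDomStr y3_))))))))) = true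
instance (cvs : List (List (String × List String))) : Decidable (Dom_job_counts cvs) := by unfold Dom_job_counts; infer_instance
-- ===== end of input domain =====

-- B replaces A's incremental try/except counter with flatten-then-count (a dict
-- comprehension valued by jobs.count); simpler decomposition, not faster.

-- ===== PORT A =====
-- inner loop body: try d[job] += 1 except KeyError: d[job] = 1
def jcStep (d : PySem.Dict String Int) (job : String) : PySem.Dict String Int :=
  match d.get? job with
  | some n => d.insert job (n + 1)
  | none   => d.insert job 1

def job_counts (cvs : List (List (String × List String))) : List (String × Int) :=
  (cvs.foldl (fun d cv =>
      match (PySem.Dict.mk cv).get? "jobs" with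
      | some jobs => jobs.foldl jcStep d
      | none      => d          -- Python raises KeyError here; excluded by Pre_job_counts
    ) PySem.Dict.empty).items

-- ===== PORT B =====
def job_counts_alt (cvs : List (List (String × List String))) : List (String × Int) :=
  let jobs := cvs.flatMap (fun cv => ((PySem.Dict.mk cv).get? "jobs").getD [])
  (jobs.foldl (fun d job => d.insert job ((PySem.List.count jobs job : Nat) : Int))
    PySem.Dict.empty).items

-- ===== PRECONDITION & SPEC =====
-- Pre_ excludes cvs with a cv lacking the "jobs" key, on which A raises KeyError.
def Pre_job_counts (cvs : List (List (String × List String))) : Prop :=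
  (cvs.all (fun cv => (PySem.Dict.mk cv).contains "jobs")) = true
instance (cvs : List (List (String × List String))) : Decidable (Pre_job_counts cvs) := by
  unfold Pre_job_counts; infer_instance

def pvWitness_job_counts : (List (List (String × List String))) :=
  [[("jobs", ["dev", "cook", "dev"])], [("jobs", ["cook"]), ("name", ["bo"])]]

def Spec_job_counts (cvs : List (List (String × List String))) (out : List (String × Int)) : Prop := out = job_counts_alt cvs
instance (cvs : List (List (String × List String))) (out : List (String × Int)) : Decidable (Spec_job_counts cvs out) := by unfold Spec_job_counts; infer_instance

-- ===== CLAIM (what is proved, stated in full; the proofs are below) =====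
def Claim_equal_job_counts : Prop := ∀ (cvs : List (List (String × List String))), Dom_job_counts cvs → Pre_job_counts cvs → Spec_job_counts cvs (job_counts cvs)

-- ===== LEMMAS AND PROOFS =====

-- A's try/except increment is the standard counter step.
theorem jcStep_eq (d : PySem.Dict String Int) (job : String) :
    jcStep d job = d.insert job (d.getD job 0 + 1) := by
  unfold jcStep
  rcases h : d.get? job with _ | n <;>
    simp [PySem.Dict.getD_eq_get?_getD, h]

-- Under Pre_, A's nested loop is the counter fold over the flattened job list.
theorem jc_foldA (cvs : List (List (String × List String))) (d : PySem.Dict String Int)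
    (h : ∀ cv ∈ cvs, (PySem.Dict.mk cv).contains "jobs" = true) :
    cvs.foldl (fun d cv =>
      match (PySem.Dict.mk cv).get? "jobs" with
      | some jobs => jobs.foldl jcStep d
      | none      => d) d
    = (cvs.flatMap (fun cv => ((PySem.Dict.mk cv).get? "jobs").getD [])).foldl jcStep d := by
  induction cvs generalizing d with
  | nil => rfl
  | cons cv rest ih =>
    have hc := h cv (by simp)
    rw [PySem.Dict.contains_eq_isSome_get?] at hc
    rcases hg : (PySem.Dict.mk cv).get? "jobs" with _ | jobs
    · simp [hg] at hc
    · simp only [List.foldl_cons, List.flatMap_cons, List.foldl_append, hg, Option.getD_some]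
      exact ih _ (fun c hc' => h c (by simp [hc']))

-- A dict comprehension keyed by the list with a value depending only on the key.
theorem items_foldl_insert_fn {κ : Type} [BEq κ] [LawfulBEq κ] (f : κ → Int) (l : List κ) :
    (l.foldl (fun d j => d.insert j (f j)) PySem.Dict.empty).items
      = (PySem.Set.ofList l).map (fun k => (k, f k)) := by
  induction l using List.reverseRecOn with
  | nil => rfl
  | append_singleton l x ih =>
    rw [List.foldl_append, List.foldl_cons, List.foldl_nil,
      PySem.Dict.items_insert, PySem.Set.ofList_append_singleton]
    have hkeys : (l.foldl (fun d j => d.insert j (f j)) PySem.Dict.empty).keys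
        = PySem.Set.ofList l := by
      rw [PySem.Dict.keys_foldl_insert]
      simp [PySem.Dict.keys, PySem.Dict.empty, PySem.Set.update_nil_left]
    by_cases hx : x ∈ PySem.Set.ofList l
    · rw [if_pos (by
        rw [PySem.Dict.contains_iff_mem_keys, hkeys]; exact hx)]
      rw [PySem.Set.add_of_mem hx, ih, List.map_map]
      apply List.map_congr_left
      intro k _
      by_cases hk : k = x <;> simp [hk]
    · rw [if_neg (by
        simp only [PySem.Dict.contains_iff_mem_keys, hkeys]; simpa using hx)]
      rw [PySem.Set.add_of_not_mem hx, ih, List.map_append]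
      rfl

-- ===== VERDICT (by name: the statement is the Claim_ definition above) =====
theorem job_counts_spec : Claim_equal_job_counts := by
  intro cvs _hdom hpre
  unfold Spec_job_counts job_counts job_counts_alt
  have hall : ∀ cv ∈ cvs, (PySem.Dict.mk cv).contains "jobs" = true := by
    intro cv hcv
    have := hpre
    unfold Pre_job_counts at this
    exact List.all_eq_true.mp this cv hcv
  rw [jc_foldA cvs PySem.Dict.empty hall]
  set jobs := cvs.flatMap (fun cv => ((PySem.Dict.mk cv).get? "jobs").getD []) with hjobs
  have hA : jobs.foldl jcStep PySem.Dict.empty = PySem.Dict.counter jobs := by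
    rw [show jcStep = (fun d j => PySem.Dict.insert d j (d.getD j 0 + 1)) from
      funext fun d => funext fun j => jcStep_eq d j]
    exact PySem.Dict.foldl_insert_getD_add_one_eq_counter jobs
  rw [hA, PySem.Dict.items_counter,
    items_foldl_insert_fn (fun j => ((PySem.List.count jobs j : Nat) : Int)) jobs]
  simp [PySem.List.count]
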